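-- pv_equiv track=rewrite | github.com/juliansweatt/machine-learning | common.py | linear_labels
-- ===== SOURCE A (Python) =====
-- def linear_labels(size=400):
--     labels = []
--     mid_point = size / 2
--     for i in range(size):
--         lab = 0
--         if i < mid_point:
--             labels.append(-1)
--         else:
--             labels.append(1)
--     return labels
-- ===== SOURCE B (Python) =====
-- def linear_labels(size=400):
--     # Two-pointer symmetric construction: shrink the index range from both ends,
--     # pushing a -1 onto the front half and a 1 onto (the reverse of) the back half;
--     # an odd size leaves one middle index, which gets -1 (it lies below size/2).
--     left, right_rev = [], []
--     lo, hi = 0, size - 1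
--     while lo < hi:
--         left.append(-1)
--         right_rev.append(1)
--         lo += 1
--         hi -= 1
--     if lo == hi:
--         left.append(-1)
--     right_rev.reverse()
--     return left + right_rev
-- ===== Notes on version B (the rewrite author's own statement) =====
-- stated objective: alternative
-- what changed: Replaces the single forward loop comparing each index against the float midpoint with a two-pointer construction that shrinks the range from both ends, never computing a midpoint: each step emits one -1 and one 1, and an odd size leaves a middle index that gets -1.
import Mathlib
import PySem

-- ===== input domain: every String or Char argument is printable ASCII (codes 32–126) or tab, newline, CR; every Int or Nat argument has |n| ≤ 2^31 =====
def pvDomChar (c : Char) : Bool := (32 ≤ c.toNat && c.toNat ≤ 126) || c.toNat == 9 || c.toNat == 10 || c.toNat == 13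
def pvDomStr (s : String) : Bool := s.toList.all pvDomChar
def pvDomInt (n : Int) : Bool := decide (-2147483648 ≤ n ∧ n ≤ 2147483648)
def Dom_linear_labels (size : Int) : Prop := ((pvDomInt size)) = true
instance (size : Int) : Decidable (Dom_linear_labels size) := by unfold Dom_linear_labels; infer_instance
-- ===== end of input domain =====

-- B replaces A's forward loop over a float midpoint by a two-pointer construction shrinking the index range from both ends (objective: alternative).


-- ===== PORT A =====
-- 'i < size / 2' (true division) is ported as '2 * i < size': for |size| ≤ 2^31 the float
-- size/2 is exact, so the float comparison coincides with this integer comparison.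
def linear_labels (size : Int) : List Int :=
  (PySem.List.pyRange 0 size 1).foldl
    (fun labels i => if 2 * i < size then labels ++ [(-1 : Int)] else labels ++ [(1 : Int)]) []

-- ===== PORT B =====
-- the while loop of Source B: two indices closing in from both ends, one -1 and one 1 per step
def pairLoop (lo hi : Int) (left right : List Int) : Int × Int × List Int × List Int :=
  if lo < hi then pairLoop (lo + 1) (hi - 1) (left ++ [(-1 : Int)]) (right ++ [(1 : Int)])
  else (lo, hi, left, right)
termination_by (hi - lo).toNat
decreasing_by omega

def linear_labels_alt (size : Int) : List Int :=
  let res := pairLoop 0 (size - 1) [] []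
  let lo := res.1
  let hi := res.2.1
  let left := res.2.2.1
  let right_rev := res.2.2.2
  let left' := if lo = hi then left ++ [(-1 : Int)] else left
  left' ++ right_rev.reverse

-- ===== PRECONDITION & SPEC =====
def Spec_linear_labels (size : Int) (out : List Int) : Prop := out = linear_labels_alt size
instance (size : Int) (out : List Int) : Decidable (Spec_linear_labels size out) := by unfold Spec_linear_labels; infer_instance

-- ===== CLAIM (what is proved, stated in full; the proofs are below) =====
def Claim_equal_linear_labels : Prop := ∀ (size : Int), Dom_linear_labels size → Spec_linear_labels size (linear_labels size)

-- ===== LEMMAS AND PROOFS =====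

-- A's loop is a map over the range.
theorem linear_labels_eq_map (size : Int) :
    linear_labels size =
      (PySem.List.pyRange 0 size 1).map (fun i => if 2 * i < size then (-1 : Int) else 1) := by
  unfold linear_labels
  have h := PySem.List.foldl_append_singleton_eq_map
    (l := PySem.List.pyRange 0 size 1)
    (f := fun i => if 2 * i < size then (-1 : Int) else 1) (acc := [])
  have hfun : (fun (labels : List Int) (i : Int) => if 2 * i < size then labels ++ [(-1:Int)] else labels ++ [(1:Int)])
      = (fun acc x => acc ++ [if 2 * x < size then (-1:Int) else 1]) := by
    funext acc i
    split <;> rfl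
  rw [hfun, h]
  simp

theorem map_const_range (a b : Int) (c : Int) (f : Int → Int)
    (hf : ∀ i, a ≤ i → i < b → f i = c) :
    (PySem.List.pyRange a b 1).map f = List.replicate (b - a).toNat c := by
  apply List.eq_replicate_iff.mpr
  constructor
  · simp [PySem.List.length_pyRange_one]
  · intro x hx
    rcases List.mem_map.mp hx with ⟨i, hi, rfl⟩
    rcases (PySem.List.mem_pyRange_one).mp hi with ⟨h1, h2⟩
    exact hf i h1 h2

-- A's value in closed form: k = ⌈size/2⌉ copies of -1, then size - k copies of 1.
theorem linear_labels_closed (size : Int) :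
    linear_labels size =
      List.replicate ((size + 1) / 2).toNat (-1) ++ List.replicate (size - (size + 1) / 2).toNat 1 := by
  rw [linear_labels_eq_map]
  set k : Int := (size + 1) / 2 with hk
  by_cases hpos : 0 < size
  · have h0k : (0 : Int) ≤ k := by omega
    have hks : k ≤ size := by omega
    rw [PySem.List.pyRange_one_append 0 k size h0k hks, List.map_append]
    rw [map_const_range 0 k (-1) _ (fun i h1 h2 => if_pos (by omega)),
        map_const_range k size 1 _ (fun i h1 h2 => if_neg (by omega))]
    simp
  · rw [PySem.List.pyRange_one_eq_nil (by omega)]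
    have h1 : k.toNat = 0 := by omega
    have h2 : (size - k).toNat = 0 := by omega
    simp [h1, h2]

-- The two-pointer loop: t steps, where t = ((hi - lo + 1)/2)⁺.
theorem pairLoop_eq (n : Nat) : ∀ (lo hi : Int) (l r : List Int), (hi - lo).toNat ≤ n →
    pairLoop lo hi l r =
      (lo + ((hi - lo + 1) / 2).toNat, hi - ((hi - lo + 1) / 2).toNat,
       l ++ List.replicate ((hi - lo + 1) / 2).toNat (-1),
       r ++ List.replicate ((hi - lo + 1) / 2).toNat 1) := by
  induction n with
  | zero =>
    intro lo hi l r h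
    have hle : hi ≤ lo := by omega
    have ht : ((hi - lo + 1) / 2).toNat = 0 := by omega
    rw [pairLoop]
    simp [if_neg (by omega : ¬ lo < hi), ht]
  | succ m ih =>
    intro lo hi l r h
    by_cases hlt : lo < hi
    · rw [pairLoop, if_pos hlt]
      rw [ih (lo + 1) (hi - 1) _ _ (by omega)]
      have ht : ((hi - 1 - (lo + 1) + 1) / 2).toNat + 1 = ((hi - lo + 1) / 2).toNat := by omega
      refine Prod.ext (by push_cast [← ht]; ring) (Prod.ext (by push_cast [← ht]; ring) (Prod.ext ?_ ?_)) <;>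
        simp [← ht, List.replicate_succ, List.append_assoc]
    · have ht : ((hi - lo + 1) / 2).toNat = 0 := by omega
      rw [pairLoop]
      simp [if_neg hlt, ht]

-- ===== VERDICT (by name: the statement is the Claim_ definition above) =====
theorem linear_labels_spec : Claim_equal_linear_labels := by
  intro size _
  unfold Spec_linear_labels linear_labels_alt
  rw [linear_labels_closed]
  rw [pairLoop_eq (size - 1 - 0).toNat 0 (size - 1) [] [] (by omega)]
  set t : Nat := ((size - 1 - 0 + 1) / 2).toNat with htdef
  have ht : t = (size / 2).toNat := by simp [htdef]
  simp only [List.nil_append, List.reverse_replicate]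
  by_cases hodd : (0 : Int) + (t : Int) = size - 1 - (t : Int)
  · -- odd positive size: middle index gets -1
    have hk : ((size + 1) / 2).toNat = t + 1 := by omega
    have hk2 : (size - (size + 1) / 2).toNat = t := by omega
    rw [if_pos hodd, hk, hk2, List.replicate_succ']
  · have hk : ((size + 1) / 2).toNat = t := by omega
    have hk2 : (size - (size + 1) / 2).toNat = t := by omega
    rw [if_neg hodd, hk, hk2]
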